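-- pv_equiv track=rewrite | github.com/jozdashh/agra | hw01/brocot/brocot.py | solve
-- ===== SOURCE A (Python) =====
-- class Fraction:
--     def __init__(self, up, down):
--         self.up = up
--         self.down = down
--
--     def __add__(self, other_frac):
--         return Fraction(self.up + other_frac.up, self.down + other_frac.down)
--
--     def __eq__(self, other_frac):
--         return self.up == other_frac.up and self.down == other_frac.down
--
--     def __lt__(self, other_frac):
--         if self.down == other_frac.down:
--             return self.up < other_frac.up
--         # https://www.youtube.com/watch?v=RD-sTZEvqHk
--         # De ahí saqué cómo hacer ésta comparación
--         i = self.up * other_frac.down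
--         j = self.down * other_frac.up
--         return i < j
--
-- def solve(target):
--   ans = ""
--   n = Fraction(target[0], target[1])
--   l = Fraction(0, 1)
--   h = Fraction(1, 0)
--   m = l + h
--   while n != m:
--       if m < n:
--           ans += "R"
--           l = m
--       elif n < m:
--           ans += "L"
--           h = m
--       m = l + h
--   return ans
-- ===== SOURCE B (Python) =====
-- def solve(target):
--     p, q = target[0], target[1]
--     out = ""
--     while p != q:
--         if p > q:
--             k = (p - 1) // q
--             out += "R" * k
--             p -= k * q
--         else:
--             k = (q - 1) // p
--             out += "L" * k
--             q -= k * p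
--     return out
-- ===== Notes on version B (the rewrite author's own statement) =====
-- stated objective: alternative
-- what changed: A walks the Stern-Brocot tree one mediant comparison per step (one path letter per iteration); B runs the Euclidean continued-fraction expansion and emits each maximal run of same letters at once with string multiplication, so it does one loop iteration per continued-fraction term instead of one per letter.
import Mathlib
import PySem

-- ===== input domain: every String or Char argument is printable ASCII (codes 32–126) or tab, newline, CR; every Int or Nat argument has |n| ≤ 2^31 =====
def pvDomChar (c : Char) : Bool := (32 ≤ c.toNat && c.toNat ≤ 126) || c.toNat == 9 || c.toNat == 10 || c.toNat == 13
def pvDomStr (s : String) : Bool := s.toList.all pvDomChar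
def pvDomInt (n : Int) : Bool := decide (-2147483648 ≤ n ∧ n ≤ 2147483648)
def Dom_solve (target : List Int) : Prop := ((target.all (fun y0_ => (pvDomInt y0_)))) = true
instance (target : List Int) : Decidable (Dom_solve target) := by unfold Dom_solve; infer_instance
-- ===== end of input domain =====

-- B replaces A's one-mediant-per-step Stern-Brocot descent by the continued-fraction
-- (Euclidean) block descent, emitting each maximal run of 'R's / 'L's at once (objective:
-- alternative; fewer loop iterations, same output).

-- ===== PORT A =====
-- Fraction.__lt__ : compare numerators when denominators are equal, else cross-multiply.
def fracLt (a b : Int × Int) : Bool :=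
  if a.2 = b.2 then decide (a.1 < b.1) else decide (a.1 * b.2 < a.2 * b.1)

-- A's while loop; the mediant m = l + h is recomputed from (l, h) each iteration, exactly as
-- the Python maintains m = l + h at the top of the loop.  none marks fuel running out while the
-- Python loop is still running (the loop diverges when it never hits n == m); Pre_ excludes that,
-- and solve supplies fuel ≥ the number of iterations on every input inside Pre_.
def loopA (fuel : Nat) (n l h : Int × Int) (ans : String) : Option String :=
  if n = (l.1 + h.1, l.2 + h.2) then some ans
  else
    match fuel with
    | 0 => none
    | f + 1 =>
      if fracLt (l.1 + h.1, l.2 + h.2) n then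
        loopA f n (l.1 + h.1, l.2 + h.2) h (ans ++ "R")
      else if fracLt n (l.1 + h.1, l.2 + h.2) then
        loopA f n l (l.1 + h.1, l.2 + h.2) (ans ++ "L")
      else none  -- neither branch fires: the Python loop repeats the same state forever

def solve (target : List Int) : String :=
  let p := (PySem.List.pyGet? target 0).getD 0  -- IndexError (fewer than 2 elements) is outside Pre_
  let q := (PySem.List.pyGet? target 1).getD 0
  (loopA (p + q).toNat (p, q) (0, 1) (1, 0) "").getD ""

-- ===== PORT B =====
-- Source B's while loop: one iteration per maximal run; "R" * k is String.ofList (List.replicate k.toNat 'R')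
-- (Python's str * k is "" for k ≤ 0, as .toNat gives).  fuel/none as for loopA (B's loop also
-- diverges exactly where A's does); Pre_ excludes that.
def bLoop (fuel : Nat) (p q : Int) (out : String) : Option String :=
  if p = q then some out
  else
    match fuel with
    | 0 => none
    | f + 1 =>
      if q < p then
        let k := PySem.Int.floordiv (p - 1) q
        bLoop f (p - k * q) q (out ++ String.ofList (List.replicate k.toNat 'R'))
      else
        let k := PySem.Int.floordiv (q - 1) p
        bLoop f p (q - k * p) (out ++ String.ofList (List.replicate k.toNat 'L'))

def solve_alt (target : List Int) : String :=
  let p := (PySem.List.pyGet? target 0).getD 0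
  let q := (PySem.List.pyGet? target 1).getD 0
  (bLoop (p + q).toNat p q "").getD ""

-- ===== PRECONDITION & SPEC =====
-- Pre_ = exactly the inputs on which A returns: the first two elements must exist (else
-- IndexError), and A's while loop terminates iff their quotient is a node of the
-- Stern-Brocot tree, i.e. both entries ≥ 1 and coprime (otherwise the loop never ends).
def Pre_solve (target : List Int) : Prop :=
  2 ≤ target.length ∧ 1 ≤ target.getD 0 0 ∧ 1 ≤ target.getD 1 0 ∧
    Int.gcd (target.getD 0 0) (target.getD 1 0) = 1
instance (target : List Int) : Decidable (Pre_solve target) := by unfold Pre_solve; infer_instance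

def pvWitness_solve : List Int := [3, 2]

def Spec_solve (target : List Int) (out : String) : Prop := out = solve_alt target
instance (target : List Int) (out : String) : Decidable (Spec_solve target out) := by
  unfold Spec_solve; infer_instance

-- ===== CLAIM (what is proved, stated in full; the proofs are below) =====
def Claim_equal_solve : Prop :=
  ∀ (target : List Int), Dom_solve target → Pre_solve target → Spec_solve target (solve target)

-- ===== LEMMAS AND PROOFS =====

-- The common reference: the subtractive (one step per unit) Stern-Brocot path.
def path (p q : Int) : String :=
  if h : 1 ≤ p ∧ 1 ≤ q ∧ p ≠ q then
    if q < p then "R" ++ path (p - q) q else "L" ++ path p (q - p)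
  else ""
  termination_by (p + q).toNat
  decreasing_by
  · omega
  · omega

-- Fraction.__lt__ against a fraction with positive denominator is plain cross-multiplication.
theorem fracLt_pos_right (u v p q : Int) (hq : 0 < q) :
    fracLt (u, v) (p, q) = decide (u * q < v * p) := by
  simp only [fracLt]
  by_cases hv : v = q
  · subst hv
    rw [if_pos rfl]
    simp only [decide_eq_decide]
    constructor <;> intro h <;> nlinarith
  · rw [if_neg hv]

theorem fracLt_pos_left (p q u v : Int) (hq : 0 < q) :
    fracLt (p, q) (u, v) = decide (p * v < q * u) := by
  simp only [fracLt]
  by_cases hv : q = v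
  · subst hv
    rw [if_pos rfl]
    simp only [decide_eq_decide]
    constructor <;> intro h <;> nlinarith
  · rw [if_neg hv]

-- A's loop is invariant under the homography x ↦ x + 1 acting on target and cone.
theorem loopA_shiftR (fuel : Nat) :
    ∀ (a b c d p q : Int) (acc : String), 1 ≤ p → 1 ≤ q →
      loopA fuel (p + q, q) (a + b, b) (c + d, d) acc = loopA fuel (p, q) (a, b) (c, d) acc := by
  induction fuel with
  | zero =>
    intro a b c d p q acc hp hq
    simp only [loopA]
    have h1 : ((p + q, q) = (a + b + (c + d), b + d)) ↔ ((p, q) = (a + c, b + d)) := by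
      simp only [Prod.mk.injEq]; omega
    rw [if_congr h1 rfl rfl]
  | succ f ih =>
    intro a b c d p q acc hp hq
    simp only [loopA]
    have h1 : ((p + q, q) = (a + b + (c + d), b + d)) ↔ ((p, q) = (a + c, b + d)) := by
      simp only [Prod.mk.injEq]; omega
    have h2 : fracLt (a + b + (c + d), b + d) (p + q, q) = fracLt (a + c, b + d) (p, q) := by
      rw [fracLt_pos_right _ _ _ _ (by omega), fracLt_pos_right _ _ _ _ (by omega)]
      simp only [decide_eq_decide]
      constructor <;> intro h <;> nlinarith
    have h3 : fracLt (p + q, q) (a + b + (c + d), b + d) = fracLt (p, q) (a + c, b + d) := by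
      rw [fracLt_pos_left _ _ _ _ (by omega), fracLt_pos_left _ _ _ _ (by omega)]
      simp only [decide_eq_decide]
      constructor <;> intro h <;> nlinarith
    rw [if_congr h1 rfl rfl, h2, h3]
    by_cases he : (p, q) = (a + c, b + d)
    · rw [if_pos he, if_pos he]
    · rw [if_neg he, if_neg he]
      by_cases hR : fracLt (a + c, b + d) (p, q) = true
      · rw [if_pos hR, if_pos hR]
        have e1 : (a + b + (c + d) : Int) = (a + c) + (b + d) := by ring
        rw [e1]
        exact ih (a + c) (b + d) c d p q (acc ++ "R") hp hq
      · rw [if_neg hR, if_neg hR]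
        by_cases hL : fracLt (p, q) (a + c, b + d) = true
        · rw [if_pos hL, if_pos hL]
          have e1 : (a + b + (c + d) : Int) = (a + c) + (b + d) := by ring
          rw [e1]
          exact ih a b (a + c) (b + d) p q (acc ++ "L") hp hq
        · rw [if_neg hL, if_neg hL]

-- …and under the homography x ↦ x / (x + 1).
theorem loopA_shiftL (fuel : Nat) :
    ∀ (a b c d p q : Int) (acc : String), 1 ≤ p → 1 ≤ q →
      loopA fuel (p, p + q) (a, a + b) (c, c + d) acc = loopA fuel (p, q) (a, b) (c, d) acc := by
  induction fuel with
  | zero =>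
    intro a b c d p q acc hp hq
    simp only [loopA]
    have h1 : ((p, p + q) = (a + c, a + b + (c + d))) ↔ ((p, q) = (a + c, b + d)) := by
      simp only [Prod.mk.injEq]; omega
    rw [if_congr h1 rfl rfl]
  | succ f ih =>
    intro a b c d p q acc hp hq
    simp only [loopA]
    have h1 : ((p, p + q) = (a + c, a + b + (c + d))) ↔ ((p, q) = (a + c, b + d)) := by
      simp only [Prod.mk.injEq]; omega
    have h2 : fracLt (a + c, a + b + (c + d)) (p, p + q) = fracLt (a + c, b + d) (p, q) := by
      rw [fracLt_pos_right _ _ _ _ (by omega), fracLt_pos_right _ _ _ _ (by omega)]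
      simp only [decide_eq_decide]
      constructor <;> intro h <;> nlinarith
    have h3 : fracLt (p, p + q) (a + c, a + b + (c + d)) = fracLt (p, q) (a + c, b + d) := by
      rw [fracLt_pos_left _ _ _ _ (by omega), fracLt_pos_left _ _ _ _ (by omega)]
      simp only [decide_eq_decide]
      constructor <;> intro h <;> nlinarith
    rw [if_congr h1 rfl rfl, h2, h3]
    by_cases he : (p, q) = (a + c, b + d)
    · rw [if_pos he, if_pos he]
    · rw [if_neg he, if_neg he]
      by_cases hR : fracLt (a + c, b + d) (p, q) = true
      · rw [if_pos hR, if_pos hR]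
        have e1 : (a + b + (c + d) : Int) = (a + c) + (b + d) := by ring
        rw [e1]
        exact ih (a + c) (b + d) c d p q (acc ++ "R") hp hq
      · rw [if_neg hR, if_neg hR]
        by_cases hL : fracLt (p, q) (a + c, b + d) = true
        · rw [if_pos hL, if_pos hL]
          have e1 : (a + b + (c + d) : Int) = (a + c) + (b + d) := by ring
          rw [e1]
          exact ih a b (a + c) (b + d) p q (acc ++ "L") hp hq
        · rw [if_neg hL, if_neg hL]

theorem gcd_sub_one (p q : Int) : Int.gcd (p - q) q = Int.gcd p q := by
  have := Int.gcd_sub_mul_right_left q p 1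
  simpa using this

theorem bLoop_self (fuel : Nat) (p : Int) (acc : String) : bLoop fuel p p acc = some acc := by
  cases fuel <;> rw [bLoop] <;> simp

theorem path_eq_empty (p : Int) : path p p = "" := by
  rw [path]
  simp

-- A's loop computes the subtractive path.
theorem loopA_path (fuel : Nat) :
    ∀ (p q : Int) (acc : String), 1 ≤ p → 1 ≤ q → Int.gcd p q = 1 →
      (p + q).toNat ≤ fuel + 2 →
      loopA fuel (p, q) (0, 1) (1, 0) acc = some (acc ++ path p q) := by
  induction fuel with
  | zero =>
    intro p q acc hp hq hg hb
    have hpq : p = q := by omega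
    subst hpq
    have hp1 : p = 1 := by rw [Int.gcd_self] at hg; omega
    subst hp1
    rw [loopA, if_pos (by norm_num), path_eq_empty]
    simp
  | succ f ih =>
    intro p q acc hp hq hg hb
    by_cases hpq : p = q
    · subst hpq
      have hp1 : p = 1 := by rw [Int.gcd_self] at hg; omega
      subst hp1
      rw [loopA, if_pos (by norm_num), path_eq_empty]
      simp
    · have hne : ¬ ((p, q) = ((0:Int) + 1, (1:Int) + 0)) := by
        simp only [Prod.mk.injEq]; omega
      rw [loopA, if_neg hne]
      by_cases hqp : q < p
      · have hRlt : fracLt ((0:Int) + 1, (1:Int) + 0) (p, q) = true := by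
          rw [fracLt_pos_right _ _ _ _ (by omega)]
          simp only [decide_eq_true_eq]
          nlinarith
        rw [if_pos hRlt]
        have hs := loopA_shiftR f 0 1 1 0 (p - q) q (acc ++ "R") (by omega) hq
        have e1 : p - q + q = p := by ring
        rw [e1] at hs
        norm_num at hs ⊢
        rw [hs]
        rw [ih (p - q) q (acc ++ "R") (by omega) hq (by rw [gcd_sub_one]; exact hg) (by omega)]
        conv_rhs => rw [path]
        rw [dif_pos ⟨hp, hq, hpq⟩, if_pos hqp, String.append_assoc]
      · have hplt : p < q := by omega
        have hRge : ¬ (fracLt ((0:Int) + 1, (1:Int) + 0) (p, q) = true) := by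
          rw [fracLt_pos_right _ _ _ _ (by omega)]
          simp only [decide_eq_true_eq]
          nlinarith
        have hLlt : fracLt (p, q) ((0:Int) + 1, (1:Int) + 0) = true := by
          rw [fracLt_pos_left _ _ _ _ (by omega)]
          simp only [decide_eq_true_eq]
          nlinarith
        rw [if_neg hRge, if_pos hLlt]
        have hs := loopA_shiftL f 0 1 1 0 p (q - p) (acc ++ "L") hp (by omega)
        have e1 : p + (q - p) = q := by ring
        rw [e1] at hs
        norm_num at hs ⊢
        rw [hs]
        rw [ih p (q - p) (acc ++ "L") hp (by omega)
          (by rw [Int.gcd_comm, gcd_sub_one, Int.gcd_comm]; exact hg) (by omega)]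
        conv_rhs => rw [path]
        rw [dif_pos ⟨hp, hq, hpq⟩, if_neg (by omega), String.append_assoc]

-- A maximal run of k 'R' steps of the subtractive path, collapsed.
theorem path_runs_R (k : Nat) :
    ∀ (p q : Int), 1 ≤ q → (k : Int) * q < p →
      path p q = String.ofList (List.replicate k 'R') ++ path (p - (k : Int) * q) q := by
  induction k with
  | zero =>
    intro p q hq h
    norm_num
  | succ k ih =>
    intro p q hq h
    have hk0 : (0:Int) ≤ (k : Int) := by positivity
    push_cast at h
    have hqp : q < p := by nlinarith
    rw [path, dif_pos ⟨by omega, hq, by omega⟩, if_pos hqp]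
    have h' : (k : Int) * q < p - q := by nlinarith
    rw [ih (p - q) q hq h']
    rw [← String.append_assoc, show "R" = String.ofList ['R'] by decide, ← String.ofList_append]
    have e1 : p - q - (k : Int) * q = p - ((k : Nat) + 1 : Int) * q := by push_cast; ring
    rw [e1]
    rfl

theorem path_runs_L (k : Nat) :
    ∀ (p q : Int), 1 ≤ p → (k : Int) * p < q →
      path p q = String.ofList (List.replicate k 'L') ++ path p (q - (k : Int) * p) := by
  induction k with
  | zero =>
    intro p q hp h
    norm_num
  | succ k ih =>
    intro p q hp h
    have hk0 : (0:Int) ≤ (k : Int) := by positivity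
    push_cast at h
    have hpq : p < q := by nlinarith
    rw [path, dif_pos ⟨hp, by omega, by omega⟩, if_neg (by omega)]
    have h' : (k : Int) * p < q - p := by nlinarith
    rw [ih p (q - p) hp h']
    rw [← String.append_assoc, show "L" = String.ofList ['L'] by decide, ← String.ofList_append]
    have e1 : q - p - (k : Int) * p = q - ((k : Nat) + 1 : Int) * p := by push_cast; ring
    rw [e1]
    rfl

-- B's loop computes the same subtractive path, one maximal run per iteration.
theorem bLoop_path (fuel : Nat) :
    ∀ (p q : Int) (acc : String), 1 ≤ p → 1 ≤ q → Int.gcd p q = 1 →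
      (p + q).toNat ≤ fuel + 2 →
      bLoop fuel p q acc = some (acc ++ path p q) := by
  induction fuel with
  | zero =>
    intro p q acc hp hq hg hb
    have hpq : p = q := by omega
    subst hpq
    rw [bLoop, if_pos rfl, path_eq_empty]
    simp
  | succ f ih =>
    intro p q acc hp hq hg hb
    by_cases hpq : p = q
    · subst hpq
      rw [bLoop, if_pos rfl, path_eq_empty]
      simp
    · rw [bLoop, if_neg hpq]
      by_cases hqp : q < p
      · rw [if_pos hqp]
        show bLoop f (p - PySem.Int.floordiv (p - 1) q * q) q
            (acc ++ String.ofList (List.replicate (PySem.Int.floordiv (p - 1) q).toNat 'R')) =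
          some (acc ++ path p q)
        set k := PySem.Int.floordiv (p - 1) q with hk0
        obtain ⟨hk1, hk2⟩ := (PySem.Int.floordiv_eq_iff_of_pos (by omega : (0:Int) < q)).mp hk0.symm
        have hk : 1 ≤ k := by nlinarith
        have hkt : ((k.toNat : Int)) = k := Int.toNat_of_nonneg (by omega)
        have hrun := path_runs_R k.toNat p q hq (by rw [hkt]; linarith)
        rw [hkt] at hrun
        rw [hrun]
        have hp'1 : 1 ≤ p - k * q := by linarith
        by_cases hfin : p - k * q = q
        · rw [hfin, bLoop_self, path_eq_empty]
          simp
        · have hgc : Int.gcd (p - k * q) q = 1 := by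
            rw [Int.gcd_sub_mul_right_left]; exact hg
          have hple : p - k * q + q ≤ p := by nlinarith
          have hbnd : (p - k * q + q).toNat ≤ f + 2 := by
            have h1 : (1:Int) ≤ p - k * q := hp'1
            generalize p - k * q = X at h1 hple ⊢
            omega
          rw [ih (p - k * q) q _ hp'1 hq hgc hbnd, String.append_assoc]
      · have hplt : p < q := by omega
        rw [if_neg hqp]
        show bLoop f p (q - PySem.Int.floordiv (q - 1) p * p)
            (acc ++ String.ofList (List.replicate (PySem.Int.floordiv (q - 1) p).toNat 'L')) =
          some (acc ++ path p q)
        set k := PySem.Int.floordiv (q - 1) p with hk0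
        obtain ⟨hk1, hk2⟩ := (PySem.Int.floordiv_eq_iff_of_pos (by omega : (0:Int) < p)).mp hk0.symm
        have hk : 1 ≤ k := by nlinarith
        have hkt : ((k.toNat : Int)) = k := Int.toNat_of_nonneg (by omega)
        have hrun := path_runs_L k.toNat p q hp (by rw [hkt]; linarith)
        rw [hkt] at hrun
        rw [hrun]
        have hq'1 : 1 ≤ q - k * p := by linarith
        by_cases hfin : p = q - k * p
        · rw [← hfin, bLoop_self, path_eq_empty]
          simp
        · have hgc : Int.gcd p (q - k * p) = 1 := by
            rw [Int.gcd_comm, Int.gcd_sub_mul_right_left, Int.gcd_comm]; exact hg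
          have hple : p + (q - k * p) ≤ q := by nlinarith
          have hbnd : (p + (q - k * p)).toNat ≤ f + 2 := by
            have h1 : (1:Int) ≤ q - k * p := hq'1
            generalize q - k * p = X at h1 hple ⊢
            omega
          rw [ih p (q - k * p) _ hp hq'1 hgc hbnd, String.append_assoc]

-- ===== VERDICT (by name: the statement is the Claim_ definition above) =====
theorem solve_spec : Claim_equal_solve := by
  intro target hdom hpre
  obtain ⟨hl, h0, h1, hg⟩ := hpre
  cases target with
  | nil => simp at hl
  | cons p t =>
    cases t with
    | nil => simp at hl
    | cons q rest =>
      simp only [List.getD_cons_zero, List.getD_cons_succ] at h0 h1 hg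
      unfold Spec_solve solve solve_alt
      have hget0 : (PySem.List.pyGet? (p :: q :: rest) 0).getD 0 = p := by
        simp [PySem.List.pyGet?, PySem.List.pyIdx?,
          show (0:Int) ≤ (rest.length:Int) + 1 by positivity]
      have hget1 : (PySem.List.pyGet? (p :: q :: rest) 1).getD 0 = q := by
        simp [PySem.List.pyGet?, PySem.List.pyIdx?]
      simp only [hget0, hget1]
      rw [loopA_path _ p q "" h0 h1 hg (by omega), bLoop_path _ p q "" h0 h1 hg (by omega)]
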